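/- GENERATED by c/gen_decode.py: decode facts of the image, one per distinct instruction byte string. -/
import UserX.DecodeImage

#decode_all ProgX.Base.Dec
  "3d02fcffff"  -- cmp eax,0xfffffc02
  "4821f2"  -- and rdx,rsi
  "4885f6"  -- test rsi,rsi
  "4889f8"  -- mov rax,rdi
  "48c1e734"  -- shl rdi,0x34
  "4989fe"  -- mov r14,rdi
  "4d39fc"  -- cmp r12,r15
  "660f2fe0"  -- comisd xmm4,xmm0
  "740c"  -- je 101dc0
  "767c"  -- jbe 101942
  "81fbff030000"  -- cmp ebx,0x3ff
  "bb00101400"  -- mov ebx,0x141000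
  "e853f2ffff"  -- call 101d00
  "e8c64f0000"  -- call 105000
  "eb14"  -- jmp 10154c
  "f20f100c24"  -- movsd xmm1,QWORD PTR [rsp]
  "f20f58c3"  -- addsd xmm0,xmm3
  "f20f59f8"  -- mulsd xmm7,xmm0
  "f20f5e1dd0e10300"  -- divsd xmm3,QWORD PTR [rip+0x3e1d0]
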